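-- pv_equiv track=rewrite | github.com/bappa402/Python | string matching by lkp.py | get_highest_score_lines
-- ===== SOURCE A (Python) =====
-- def get_highest_score_lines(scores):
--     highest_score = 0
--     best_lines = []
--     for line, score in scores.items():
--         if score > highest_score:
--             highest_score = score
--             best_lines = [line]
--         elif score == highest_score:
--             best_lines.append(line)
--     return best_lines, highest_score
-- ===== SOURCE B (Python) =====
-- def get_highest_score_lines(scores):
--     highest = max([0, *scores.values()])
--     best_lines = [line for line, score in scores.items() if score == highest]
--     return best_lines, highest
-- ===== Notes on version B (the rewrite author's own statement) =====
-- stated objective: simpler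
-- what changed: Replaced A's single pass with running max and best-list resets by a two-pass find-max-then-filter decomposition (max seeded with 0, then filter lines equal to it).
import Mathlib
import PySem

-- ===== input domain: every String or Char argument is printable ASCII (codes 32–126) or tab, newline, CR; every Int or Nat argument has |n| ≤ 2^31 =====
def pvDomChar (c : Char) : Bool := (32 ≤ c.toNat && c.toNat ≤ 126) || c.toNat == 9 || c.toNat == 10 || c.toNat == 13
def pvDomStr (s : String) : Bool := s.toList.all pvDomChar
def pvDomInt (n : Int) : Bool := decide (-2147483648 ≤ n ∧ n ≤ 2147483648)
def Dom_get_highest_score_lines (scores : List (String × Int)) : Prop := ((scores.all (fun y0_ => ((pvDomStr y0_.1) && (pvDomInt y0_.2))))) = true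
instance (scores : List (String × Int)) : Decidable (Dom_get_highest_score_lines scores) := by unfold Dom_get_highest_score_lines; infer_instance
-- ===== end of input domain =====

-- ===== PORT A =====
-- Loop of A: state (highest_score, best_lines), branches in source order.
def goA : List (String × Int) → Int → List String → List String × Int
  | [], h, b => (b, h)
  | (line, score) :: rest, h, b =>
    if h < score then goA rest score [line]
    else if score = h then goA rest h (b ++ [line])
    else goA rest h b

def get_highest_score_lines (scores : List (String × Int)) : List String × Int :=
  goA scores 0 []

-- ===== PORT B =====
def get_highest_score_lines_alt (scores : List (String × Int)) : List String × Int :=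
  let highest := List.foldl (fun a p => max a p.2) 0 scores
  ((scores.filter (fun p => p.2 == highest)).map Prod.fst, highest)

-- ===== PRECONDITION & SPEC =====
def Spec_get_highest_score_lines (scores : List (String × Int)) (out : List String × Int) : Prop := out = get_highest_score_lines_alt scores
instance (scores : List (String × Int)) (out : List String × Int) : Decidable (Spec_get_highest_score_lines scores out) := by unfold Spec_get_highest_score_lines; infer_instance

-- ===== CLAIM (what is proved, stated in full; the proofs are below) =====
def Claim_equal_get_highest_score_lines : Prop := ∀ (scores : List (String × Int)), Dom_get_highest_score_lines scores → Spec_get_highest_score_lines scores (get_highest_score_lines scores)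

-- ===== LEMMAS AND PROOFS =====
theorem le_foldl_max (l : List (String × Int)) (h : Int) :
    h ≤ List.foldl (fun a p => max a p.2) h l := by
  induction l generalizing h with
  | nil => simp
  | cons x rest ih => exact le_trans (le_max_left _ _) (ih (max h x.2))

theorem goA_eq (l : List (String × Int)) (h : Int) (b : List String) :
    goA l h b =
      ((if List.foldl (fun a p => max a p.2) h l = h then b else []) ++
        (l.filter (fun p => p.2 == List.foldl (fun a p => max a p.2) h l)).map Prod.fst,
       List.foldl (fun a p => max a p.2) h l) := by
  induction l generalizing h b with
  | nil => simp [goA]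
  | cons x rest ih =>
    obtain ⟨line, score⟩ := x
    by_cases hgt : h < score
    · have hmax : max h score = score := max_eq_right (le_of_lt hgt)
      have hM : score ≤ List.foldl (fun a p => max a p.2) score rest := le_foldl_max rest score
      have hne : List.foldl (fun a p => max a p.2) score rest ≠ h := by omega
      rw [show goA ((line, score) :: rest) h b = goA rest score [line] by
        simp [goA, hgt], List.foldl_cons, hmax, ih, List.filter_cons, if_neg hne]
      by_cases hsM : score = List.foldl (fun a p => max a p.2) score rest
      · simp [← hsM]
      · have hs2 : ¬ List.foldl (fun a p => max a p.2) score rest = score :=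
          fun e => hsM e.symm
        simp [hsM, hs2]
    · have hmax : max h score = h := max_eq_left (by omega)
      by_cases heq : score = h
      · rw [show goA ((line, score) :: rest) h b = goA rest h (b ++ [line]) by
          simp [goA, hgt, heq], List.foldl_cons, hmax, ih, List.filter_cons]
        by_cases hMh : List.foldl (fun a p => max a p.2) h rest = h
        · simp [hMh, heq]
        · have hs : ¬ score = List.foldl (fun a p => max a p.2) h rest := by
            rw [heq]; exact fun e => hMh e.symm
          simp [hMh, hs]
      · have hM : h ≤ List.foldl (fun a p => max a p.2) h rest := le_foldl_max rest h
        have hsne : ¬ score = List.foldl (fun a p => max a p.2) h rest := by omega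
        rw [show goA ((line, score) :: rest) h b = goA rest h b by
          simp [goA, hgt, heq], List.foldl_cons, hmax, ih, List.filter_cons]
        simp [hsne]

-- ===== VERDICT =====
theorem get_highest_score_lines_spec : Claim_equal_get_highest_score_lines := by
  intro scores _
  unfold Spec_get_highest_score_lines get_highest_score_lines get_highest_score_lines_alt
  rw [goA_eq]
  split <;> simp
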